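-- pv_equiv track=rewrite | github.com/ferozmobigit/syns | synonymp.py | checkSyn
-- ===== SOURCE A (Python) =====
-- def checkSyn(sys1,sys2,dict):
--     if dict[sys1]==sys2:
--         return True
--     else:
--         if dict[sys1] in dict.keys():
--             return checkSyn(dict[sys1],sys2,dict)
--         else:
--             return False
-- ===== SOURCE B (Python) =====
-- def checkSyn(sys1, sys2, dict):
--     # Iterative: collect the lookup chain starting at dict[sys1] (a seen set
--     # stops at a revisit), then answer by membership of sys2 in the chain.
--     cur = dict[sys1]          # KeyError if sys1 is missing, exactly as A
--     chain = [cur]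
--     seen = set()
--     while cur in dict and cur not in seen:
--         seen.add(cur)
--         cur = dict[cur]
--         chain.append(cur)
--     return sys2 in chain
-- ===== Notes on version B (the rewrite author's own statement) =====
-- stated objective: alternative
-- what changed: A's recursive descent is replaced by an iterative while-loop that collects the lookup chain into a list (with a seen set stopping at revisits) and answers by a final membership test of sys2 in that chain.
import Mathlib
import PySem

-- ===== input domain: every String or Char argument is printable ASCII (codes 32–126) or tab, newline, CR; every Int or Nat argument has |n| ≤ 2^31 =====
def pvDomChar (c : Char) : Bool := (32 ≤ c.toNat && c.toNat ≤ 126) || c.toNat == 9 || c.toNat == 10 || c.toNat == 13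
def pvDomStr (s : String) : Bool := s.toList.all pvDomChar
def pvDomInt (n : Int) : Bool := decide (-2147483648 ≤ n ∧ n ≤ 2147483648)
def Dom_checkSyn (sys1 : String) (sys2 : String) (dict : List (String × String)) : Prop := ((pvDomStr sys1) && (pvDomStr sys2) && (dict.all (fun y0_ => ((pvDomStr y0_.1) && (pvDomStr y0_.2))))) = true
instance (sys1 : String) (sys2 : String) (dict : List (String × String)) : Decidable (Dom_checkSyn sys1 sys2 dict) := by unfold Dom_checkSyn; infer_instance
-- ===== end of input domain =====

-- B replaces A's recursion by an iterative chain-collection (seen set + list) followed by a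
-- membership test — an alternative decomposition of the same chain walk, not claimed faster.

-- ===== PORT A =====
-- A's recursion, transliterated with a fuel guard that only makes it total; under
-- Pre_checkSyn the fuel (dict.length + 1) is never exhausted.
def checkSynFuel (dict : List (String × String)) (sys2 : String) : Nat → String → Bool
  | 0, _ => false
  | fuel + 1, sys1 =>
    match PySem.Dict.get? ⟨dict⟩ sys1 with
    | none => false            -- dict[sys1] raises KeyError: excluded by Pre_checkSyn
    | some v =>
      if v = sys2 then true
      else if PySem.Dict.contains ⟨dict⟩ v then checkSynFuel dict sys2 fuel v
      else false

def checkSyn (sys1 : String) (sys2 : String) (dict : List (String × String)) : Bool :=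
  checkSynFuel dict sys2 (dict.length + 1) sys1

-- ===== PORT B =====
-- the while-loop of Source B: nodes appended to `chain` after the current one (fuel guard only
-- for totality; the seen-set check bounds the loop by the number of distinct keys).
def chainFrom (dict : List (String × String)) : Nat → PySem.Set String → String → List String
  | 0, _, _ => []
  | fuel + 1, seen, cur =>
    match PySem.Dict.get? ⟨dict⟩ cur with       -- `cur in dict` (and the value dict[cur])
    | none => []
    | some v =>
      if PySem.Set.contains seen cur then []    -- `cur not in seen` failed: stop
      else v :: chainFrom dict fuel (PySem.Set.add seen cur) v

def checkSyn_alt (sys1 : String) (sys2 : String) (dict : List (String × String)) : Bool :=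
  match PySem.Dict.get? ⟨dict⟩ sys1 with
  | none => false              -- dict[sys1] raises KeyError: excluded by Pre_checkSyn
  | some v =>
    (v :: chainFrom dict (dict.length + 1) PySem.Set.empty v).contains sys2

-- ===== PRECONDITION & SPEC =====
-- the dict's lookup as a total step function (non-keys are fixpoints)
def pvStep (dict : List (String × String)) (k : String) : String :=
  (PySem.Dict.get? ⟨dict⟩ k).getD k

-- Pre_ excludes exactly the inputs on which A raises: sys1 not a key (KeyError on
-- dict[sys1]), and inputs whose iterated lookup from sys1 never reaches sys2 or a non-key
-- (the chain cycles and A recurses forever: RecursionError). A chain that does terminate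
-- does so within (number of distinct keys) steps.
def Pre_checkSyn (sys1 : String) (sys2 : String) (dict : List (String × String)) : Prop :=
  PySem.Dict.contains ⟨dict⟩ sys1 = true ∧
  ∃ m < (PySem.List.dedup (PySem.Dict.keys ⟨dict⟩)).length,
    ((pvStep dict)^[m + 1] sys1 = sys2 ∨
      PySem.Dict.contains ⟨dict⟩ ((pvStep dict)^[m + 1] sys1) = false)
instance (sys1 : String) (sys2 : String) (dict : List (String × String)) : Decidable (Pre_checkSyn sys1 sys2 dict) := by unfold Pre_checkSyn; infer_instance

def pvWitness_checkSyn : String × String × (List (String × String)) :=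
  ("a", "c", [("a", "b"), ("b", "c")])

def Spec_checkSyn (sys1 : String) (sys2 : String) (dict : List (String × String)) (out : Bool) : Prop := out = checkSyn_alt sys1 sys2 dict
instance (sys1 : String) (sys2 : String) (dict : List (String × String)) (out : Bool) : Decidable (Spec_checkSyn sys1 sys2 dict out) := by unfold Spec_checkSyn; infer_instance

-- ===== CLAIM (what is proved, stated in full; the proofs are below) =====
def Claim_equal_checkSyn : Prop := ∀ (sys1 : String) (sys2 : String) (dict : List (String × String)), Dom_checkSyn sys1 sys2 dict → Pre_checkSyn sys1 sys2 dict → Spec_checkSyn sys1 sys2 dict (checkSyn sys1 sys2 dict)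

-- ===== LEMMAS AND PROOFS =====

-- Proof-side device: pvStopsAux dict sys2 rem.length rem cur = true says A's chain from cur
-- terminates visiting pairwise-distinct keys taken from rem (each step erases the visited one).
def pvStopsAux (dict : List (String × String)) (sys2 : String) : Nat → List String → String → Bool
  | 0, _, _ => false
  | n + 1, rem, cur =>
    if cur ∈ rem then
      match PySem.Dict.get? ⟨dict⟩ cur with
      | none => true
      | some v =>
        if v = sys2 then true
        else if PySem.Dict.contains ⟨dict⟩ v then pvStopsAux dict sys2 n (rem.erase cur) v
        else true
    else false

-- iterates of a periodic point repeat with its period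
theorem iterate_mod (f : String → String) (x : String) (p : Nat) (hp : 0 < p)
    (hx : f^[p] x = x) : ∀ t, f^[t] x = f^[t % p] x := by
  intro t
  induction t using Nat.strong_induction_on with
  | _ t ih =>
    by_cases ht : t < p
    · rw [Nat.mod_eq_of_lt ht]
    · have hle : p ≤ t := le_of_not_gt ht
      have h1 : f^[t] x = f^[t - p] x := by
        conv_lhs => rw [show t = t - p + p from by omega]
        rw [Function.iterate_add_apply, hx]
      calc f^[t] x = f^[t - p] x := h1
        _ = f^[(t - p) % p] x := ih (t - p) (by omega)
        _ = f^[t % p] x := by rw [← Nat.mod_eq_sub_mod hle]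

-- If A's chain from `cur` first meets sys2 or a non-key after m more steps and its nodes up
-- to then lie in the unvisited set `rem`, the chain never revisits a node (a revisit would
-- make it periodic, contradicting that it meets the stopping condition), so pvStopsAux holds.
theorem stops_of_chain (dict : List (String × String)) (sys2 : String) :
    ∀ (m : Nat) (rem : List String) (cur : String),
      PySem.Dict.contains ⟨dict⟩ cur = true →
      (∀ j < m, (pvStep dict)^[j + 1] cur ≠ sys2 ∧
        PySem.Dict.contains ⟨dict⟩ ((pvStep dict)^[j + 1] cur) = true) →
      ((pvStep dict)^[m + 1] cur = sys2 ∨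
        PySem.Dict.contains ⟨dict⟩ ((pvStep dict)^[m + 1] cur) = false) →
      (∀ j ≤ m, (pvStep dict)^[j] cur ∈ rem) →
      pvStopsAux dict sys2 rem.length rem cur = true := by
  intro m
  induction m with
  | zero =>
    intro rem cur hcont _ hT hmem
    have hcur : cur ∈ rem := by simpa using hmem 0 (le_refl 0)
    rcases hn : rem.length with _ | n
    · rw [List.length_eq_zero_iff.mp hn] at hcur; cases hcur
    rw [pvStopsAux]
    simp only [hcur, if_true]
    rcases hg : PySem.Dict.get? ⟨dict⟩ cur with _ | v
    · rfl
    · have hstep : pvStep dict cur = v := by simp [pvStep, hg]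
      by_cases hv2 : v = sys2
      · simp [hv2]
      · have hT' : v = sys2 ∨ PySem.Dict.contains ⟨dict⟩ v = false := by
          simpa [hstep] using hT
        rcases hT' with hT' | hT'
        · exact absurd hT' hv2
        · simp [hv2, hT']
  | succ m' ih =>
    intro rem cur hcont hNo hT hmem
    have hcur : cur ∈ rem := by simpa using hmem 0 (Nat.zero_le _)
    rcases hn : rem.length with _ | n
    · rw [List.length_eq_zero_iff.mp hn] at hcur; cases hcur
    rw [pvStopsAux]
    simp only [hcur, if_true]
    rcases hg : PySem.Dict.get? ⟨dict⟩ cur with _ | v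
    · rfl
    · have hstep : pvStep dict cur = v := by simp [pvStep, hg]
      obtain ⟨hv2, hk⟩ : v ≠ sys2 ∧ PySem.Dict.contains ⟨dict⟩ v = true := by
        simpa [hstep] using hNo 0 (by omega)
      simp only [hv2, if_false, hk, if_true]
      -- no node of the remaining chain equals cur: that would close a cycle
      have hnc : ∀ j ≤ m' + 1, (pvStep dict)^[j] cur ≠ cur ∨ j = 0 := by
        intro j hj
        by_cases hj0 : j = 0
        · exact Or.inr hj0
        refine Or.inl fun hper => ?_
        have hmod := iterate_mod (pvStep dict) cur j (by omega) hper (m' + 2)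
        set r := (m' + 2) % j with hr
        have hrlt : r < j := Nat.mod_lt _ (by omega)
        rcases hT with hT | hT
        · rw [hmod] at hT
          rcases Nat.eq_zero_or_pos r with hr0 | hr0
          · rw [hr0] at hT
            simp only [Function.iterate_zero, id_eq] at hT
            exact (hNo (j - 1) (by omega)).1 (by
              rw [(by omega : j - 1 + 1 = j), hper, hT])
          · exact (hNo (r - 1) (by omega)).1 (by
              have : r - 1 + 1 = r := by omega
              rw [this, hT])
        · rw [hmod] at hT
          rcases Nat.eq_zero_or_pos r with hr0 | hr0
          · rw [hr0] at hT
            simp only [Function.iterate_zero, id] at hT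
            rw [hT] at hcont; cases hcont
          · have := (hNo (r - 1) (by omega)).2
            rw [(by omega : r - 1 + 1 = r)] at this
            rw [this] at hT; cases hT
      have hchain : ∀ j, (pvStep dict)^[j] v = (pvStep dict)^[j + 1] cur := by
        intro j
        rw [Function.iterate_succ_apply, hstep]
      have := ih (rem.erase cur) v hk
        (by
          intro j hj
          rw [hchain (j + 1)]
          exact hNo (j + 1) (by omega))
        (by rw [hchain (m' + 1)]; exact hT)
        (by
          intro j hj
          rw [hchain j]
          have hin : (pvStep dict)^[j + 1] cur ∈ rem := hmem (j + 1) (by omega)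
          have hne : (pvStep dict)^[j + 1] cur ≠ cur := by
            rcases hnc (j + 1) (by omega) with h | h
            · exact h
            · omega
          exact (List.mem_erase_of_ne hne).mpr hin)
      have hlen' : (rem.erase cur).length = n := by
        have := List.length_erase_of_mem hcur
        omega
      rw [hlen'] at this
      exact this

-- The main invariant: while A's chain from `cur` terminates using only the unvisited keys
-- `rem` (disjoint from B's `seen`), A's recursion answers exactly "sys2 occurs in the list of
-- nodes B's loop still appends".
theorem chain_eq (dict : List (String × String)) (sys2 : String) :
    ∀ (fA : Nat) (rem : List String) (cur : String) (seen : PySem.Set String) (fB : Nat),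
      pvStopsAux dict sys2 rem.length rem cur = true → rem.Nodup →
      rem.length ≤ fA → rem.length ≤ fB →
      (∀ x ∈ seen, x ∉ rem) →
      checkSynFuel dict sys2 fA cur = (chainFrom dict fB seen cur).contains sys2 := by
  intro fA
  induction fA with
  | zero =>
    intro rem cur seen fB hs _ hlA _ _
    rcases rem with _ | _
    · simp [pvStopsAux] at hs
    · simp at hlA
  | succ f ih =>
    intro rem cur seen fB hs hnd hlA hlB hdisj
    rcases hrem : rem.length with _ | m
    · rw [hrem] at hs; simp [pvStopsAux] at hs
    rw [hrem] at hs
    rw [pvStopsAux] at hs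
    by_cases hc : cur ∈ rem
    · simp only [hc, if_true] at hs
      have hpos : 0 < rem.length := List.length_pos_of_mem hc
      rcases fB with _ | g
      · omega
      have hcs : cur ∉ seen := fun hm => hdisj cur hm hc
      rcases hlook : PySem.Dict.get? ⟨dict⟩ cur with _ | v
      · simp [checkSynFuel, chainFrom, hlook]
      · simp only [hlook] at hs
        by_cases hv2 : v = sys2
        · subst hv2
          simp [checkSynFuel, chainFrom, hlook, hcs]
        · simp only [hv2, if_false] at hs
          rcases hk : PySem.Dict.contains ⟨dict⟩ v with _ | _
          · -- v is not a key: A returns False, B appends only v and stops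
            have hvnone : PySem.Dict.get? ⟨dict⟩ v = none :=
              (PySem.Dict.get?_eq_none_iff_contains _ _).mpr hk
            have hnil : ∀ (s : PySem.Set String) (n : Nat), chainFrom dict n s v = [] := by
              intro s n
              cases n with
              | zero => rfl
              | succ n' => simp [chainFrom, hvnone]
            simp [checkSynFuel, chainFrom, hlook, hcs, hk, hnil, hv2, Ne.symm hv2]
          · -- v is a key: both sides take one step; apply the induction hypothesis
            simp only [hk, if_true] at hs
            have herase := List.length_erase_of_mem hc
            have hm' : m = (rem.erase cur).length := by omega
            rw [hm'] at hs
            have ihv := ih (rem.erase cur) v (PySem.Set.add seen cur) g hs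
              (hnd.erase cur) (by omega) (by omega)
              (by
                intro x hx
                rcases (PySem.Set.mem_add seen cur x).mp hx with hx | hx
                · exact fun hmem => hdisj x hx (List.mem_of_mem_erase hmem)
                · subst hx; exact hnd.not_mem_erase)
            simp [checkSynFuel, chainFrom, hlook, hcs, hk, hv2, Ne.symm hv2, ihv]
    · simp [hc] at hs

-- ===== VERDICT (by name: the statement is the Claim_ definition above) =====
theorem checkSyn_spec : Claim_equal_checkSyn := by
  intro sys1 sys2 dict _ hpre
  obtain ⟨hc1, hex⟩ := hpre
  unfold Spec_checkSyn checkSyn checkSyn_alt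
  rcases hlook : PySem.Dict.get? ⟨dict⟩ sys1 with _ | v₀
  · rw [(PySem.Dict.get?_eq_none_iff_contains _ _).mp hlook] at hc1
    exact absurd hc1 (by simp)
  -- one manual step of A's recursion, then the invariant lemma from v₀
  have hmem : sys1 ∈ PySem.List.dedup (PySem.Dict.keys ⟨dict⟩) := by
    rw [PySem.List.mem_dedup]
    exact (PySem.Dict.contains_iff_mem_keys _ _).mp hc1
  -- pass to the FIRST step at which the chain meets sys2 or a non-key
  have hex' : ∃ m, ((pvStep dict)^[m + 1] sys1 = sys2 ∨
      PySem.Dict.contains ⟨dict⟩ ((pvStep dict)^[m + 1] sys1) = false) := by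
    obtain ⟨m, _, hm⟩ := hex
    exact ⟨m, hm⟩
  have hT := Nat.find_spec hex'
  have hNo : ∀ j < Nat.find hex', (pvStep dict)^[j + 1] sys1 ≠ sys2 ∧
      PySem.Dict.contains ⟨dict⟩ ((pvStep dict)^[j + 1] sys1) = true := by
    intro j hj
    have hmin := Nat.find_min hex' hj
    rw [not_or] at hmin
    exact ⟨hmin.1, by
      rcases h : PySem.Dict.contains ⟨dict⟩ ((pvStep dict)^[j + 1] sys1) with _ | _
      · exact absurd h hmin.2
      · rfl⟩
  have hchainD : ∀ j ≤ Nat.find hex',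
      (pvStep dict)^[j] sys1 ∈ PySem.List.dedup (PySem.Dict.keys ⟨dict⟩) := by
    intro j hj
    rcases Nat.eq_zero_or_pos j with hj0 | hj0
    · subst hj0; simpa using hmem
    · rw [PySem.List.mem_dedup]
      have := (hNo (j - 1) (by omega)).2
      rw [(by omega : j - 1 + 1 = j)] at this
      exact (PySem.Dict.contains_iff_mem_keys _ _).mp this
  have hs := stops_of_chain dict sys2 (Nat.find hex')
    (PySem.List.dedup (PySem.Dict.keys ⟨dict⟩)) sys1 hc1 hNo hT hchainD
  have hpos : 0 < (PySem.List.dedup (PySem.Dict.keys ⟨dict⟩)).length :=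
    List.length_pos_of_mem hmem
  rcases hrem : (PySem.List.dedup (PySem.Dict.keys ⟨dict⟩)).length with _ | m
  · omega
  rw [hrem] at hs
  rw [pvStopsAux] at hs
  simp only [hmem, if_true, hlook] at hs
  have hlen : (PySem.List.dedup (PySem.Dict.keys ⟨dict⟩)).length ≤ dict.length + 1 := by
    have h1 := PySem.Set.length_ofList_le (PySem.Dict.keys ⟨dict⟩)
    rw [PySem.List.dedup_eq_ofList]
    have h2 : (PySem.Dict.keys ⟨dict⟩).length = dict.length := by
      simp [PySem.Dict.keys]
    omega
  by_cases hv2 : v₀ = sys2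
  · subst hv2
    simp [checkSynFuel, hlook]
  · simp only [hv2, if_false] at hs
    rcases hk : PySem.Dict.contains ⟨dict⟩ v₀ with _ | _
    · have hvnone : PySem.Dict.get? ⟨dict⟩ v₀ = none :=
        (PySem.Dict.get?_eq_none_iff_contains _ _).mpr hk
      simp [checkSynFuel, chainFrom, hlook, hk, hvnone, hv2, Ne.symm hv2]
    · simp only [hk, if_true] at hs
      have herase := List.length_erase_of_mem hmem
      have hm' : m = ((PySem.List.dedup (PySem.Dict.keys ⟨dict⟩)).erase sys1).length := by omega
      rw [hm'] at hs
      have hmain := chain_eq dict sys2 dict.length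
        ((PySem.List.dedup (PySem.Dict.keys ⟨dict⟩)).erase sys1) v₀
        PySem.Set.empty (dict.length + 1) hs
        ((PySem.List.nodup_dedup _).erase sys1) (by omega) (by omega)
        (by intro x hx; cases hx)
      simp [checkSynFuel, hlook, hk, hv2, Ne.symm hv2, hmain]
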